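-- pv_equiv track=rewrite | github.com/Shivkisku/Python_adv | Minimum_Broadcast_Range_for_Listeners.py | min_broadcast_range
-- ===== SOURCE A (Python) =====
-- def min_broadcast_range(listeners, towers):
--     listeners.sort()
--     towers.sort()
--     min_range = 0
--
--     for listener in listeners:
--         left_tower = None
--         right_tower = None
--
--         # Find the closest tower to the left
--         for tower in towers:
--             if tower <= listener:
--                 left_tower = tower
--             else:
--                 break
--
--         # Find the closest tower to the right
--         for tower in reversed(towers):
--             if tower >= listener:
--                 right_tower = tower
--             else:
--                 break
--
--         if left_tower is None:
--             min_range = max(min_range, right_tower - listener)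
--         elif right_tower is None:
--             min_range = max(min_range, listener - left_tower)
--         else:
--             min_range = max(min_range, min(listener - left_tower, right_tower - listener))
--
--     return min_range
-- ===== SOURCE B (Python) =====
-- def min_broadcast_range(listeners, towers):
--     listeners.sort()
--     towers.sort()
--     best = 0
--     n = len(towers)
--     for x in listeners:
--         # binary search: lo = index of first tower > x
--         lo, hi = 0, n
--         while lo < hi:
--             mid = (lo + hi) // 2
--             if towers[mid] <= x:
--                 lo = mid + 1
--             else:
--                 hi = mid
--         if lo == 0:
--             d = towers[0] - x
--         elif lo == n:
--             d = x - towers[n - 1]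
--         else:
--             d = min(x - towers[lo - 1], towers[lo] - x)
--         if d > best:
--             best = d
--     return best
-- ===== Notes on version B (the rewrite author's own statement) =====
-- stated objective: faster
-- what changed: Replaced A's per-listener linear scans over all towers (forward for the nearest left tower, backward for the nearest right tower) by one hand-rolled binary search into the sorted tower list per listener, reading the two neighbouring towers by index.
import Mathlib
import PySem

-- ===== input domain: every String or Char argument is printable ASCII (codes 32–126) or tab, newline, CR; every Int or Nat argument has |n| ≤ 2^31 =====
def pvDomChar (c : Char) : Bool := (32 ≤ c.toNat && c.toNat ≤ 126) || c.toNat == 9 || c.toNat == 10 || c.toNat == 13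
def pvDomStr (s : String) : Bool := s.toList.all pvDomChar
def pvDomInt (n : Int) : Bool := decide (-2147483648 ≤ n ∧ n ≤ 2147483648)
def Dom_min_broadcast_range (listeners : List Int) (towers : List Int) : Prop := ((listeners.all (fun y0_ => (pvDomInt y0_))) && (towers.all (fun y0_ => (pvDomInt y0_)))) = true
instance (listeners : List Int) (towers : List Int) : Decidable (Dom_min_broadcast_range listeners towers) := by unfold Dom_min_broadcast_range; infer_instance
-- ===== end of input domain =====

-- B replaces A's two per-listener linear scans over the towers by one binary search into the
-- sorted tower list (asymptotically faster). Both versions sort both argument lists in place in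
-- Python; the equivalence proved here is about the return value only.


-- ===== PORT A =====
-- A's forward scan: 'for tower in towers: if tower <= listener: left_tower = tower else: break'
def leftScanA : List Int → Int → Option Int → Option Int
  | [], _, acc => acc
  | t :: ts, x, acc => if t ≤ x then leftScanA ts x (some t) else acc

-- A's backward scan: 'for tower in reversed(towers): if tower >= listener: right_tower = tower else: break'
def rightScanA : List Int → Int → Option Int → Option Int
  | [], _, acc => acc
  | t :: ts, x, acc => if t ≥ x then rightScanA ts x (some t) else acc

def min_broadcast_range (listeners : List Int) (towers : List Int) : Int :=
  let ls := PySem.List.sorted listeners (fun t => t)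
  let ts := PySem.List.sorted towers (fun t => t)
  ls.foldl (fun mr x =>
    let left := leftScanA ts x none
    let right := rightScanA ts.reverse x none
    match left, right with
    | none, r => max mr (r.getD 0 - x)  -- Python raises TypeError if r is None (empty towers); excluded by Pre_
    | some l, none => max mr (x - l)
    | some l, some r => max mr (min (x - l) (r - x))) 0

-- ===== PORT B =====
-- B's while loop: returns the index of the first tower > x (lo after the loop)
def bsearchB (ts : List Int) (x : Int) (lo hi : Nat) : Nat :=
  if lo < hi then
    let mid := (lo + hi) / 2
    if ts.getD mid 0 ≤ x then bsearchB ts x (mid + 1) hi else bsearchB ts x lo mid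
  else lo
termination_by hi - lo
decreasing_by all_goals omega

def min_broadcast_range_alt (listeners : List Int) (towers : List Int) : Int :=
  let ls := PySem.List.sorted listeners (fun t => t)
  let ts := PySem.List.sorted towers (fun t => t)
  let n := ts.length
  ls.foldl (fun best x =>
    let lo := bsearchB ts x 0 n
    let d :=
      if lo = 0 then ts.getD 0 0 - x  -- Python towers[0] raises IndexError on empty towers; excluded by Pre_
      else if lo = n then x - ts.getD (n - 1) 0
      else min (x - ts.getD (lo - 1) 0) (ts.getD lo 0 - x)
    if d > best then d else best) 0

-- ===== PRECONDITION & SPEC =====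
-- Pre_ excludes only inputs on which the Python A raises: nonempty listeners with empty towers (TypeError).
def Pre_min_broadcast_range (listeners : List Int) (towers : List Int) : Prop :=
  towers ≠ [] ∨ listeners = []
instance (listeners : List Int) (towers : List Int) : Decidable (Pre_min_broadcast_range listeners towers) := by unfold Pre_min_broadcast_range; infer_instance

def pvWitness_min_broadcast_range : List Int × List Int := ([1, 5, 9], [2, 7])

def Spec_min_broadcast_range (listeners : List Int) (towers : List Int) (out : Int) : Prop := out = min_broadcast_range_alt listeners towers
instance (listeners : List Int) (towers : List Int) (out : Int) : Decidable (Spec_min_broadcast_range listeners towers out) := by unfold Spec_min_broadcast_range; infer_instance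

-- ===== CLAIM (what is proved, stated in full; the proofs are below) =====
def Claim_equal_min_broadcast_range : Prop := ∀ (listeners : List Int) (towers : List Int), Dom_min_broadcast_range listeners towers → Pre_min_broadcast_range listeners towers → Spec_min_broadcast_range listeners towers (min_broadcast_range listeners towers)

-- ===== LEMMAS AND PROOFS =====

-- sorted list: getD is monotone in the index
theorem sorted_getD_mono (ts : List Int)
    (hs : List.Pairwise (fun a b => a ≤ b) ts) :
    ∀ i j : Nat, i ≤ j → j < ts.length → ts.getD i 0 ≤ ts.getD j 0 := by
  intro i j hij hj
  rcases Nat.eq_or_lt_of_le hij with rfl | hlt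
  · exact le_refl _
  · rw [List.getD_eq_getElem ts 0 (by omega), List.getD_eq_getElem ts 0 hj]
    exact (List.pairwise_iff_getElem.mp hs) i j (by omega) hj hlt

-- the split predicate a binary-search result satisfies
def SplitAt (ts : List Int) (x : Int) (k : Nat) : Prop :=
  k ≤ ts.length ∧ (∀ i, i < k → ts.getD i 0 ≤ x) ∧
    (∀ i, k ≤ i → i < ts.length → x < ts.getD i 0)

theorem bsearchB_spec (ts : List Int) (x : Int)
    (hs : List.Pairwise (fun a b => a ≤ b) ts) :
    ∀ n lo hi : Nat, hi - lo = n → lo ≤ hi → hi ≤ ts.length →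
      (∀ i, i < lo → ts.getD i 0 ≤ x) →
      (∀ i, hi ≤ i → i < ts.length → x < ts.getD i 0) →
      SplitAt ts x (bsearchB ts x lo hi) := by
  intro n
  induction n using Nat.strong_induction_on with
  | _ n ih =>
    intro lo hi hn hle hhi hlow hhigh
    unfold bsearchB
    by_cases h : lo < hi
    · rw [if_pos h]
      show SplitAt ts x (if ts.getD ((lo + hi) / 2) 0 ≤ x then
        bsearchB ts x ((lo + hi) / 2 + 1) hi else bsearchB ts x lo ((lo + hi) / 2))
      by_cases hc : ts.getD ((lo + hi) / 2) 0 ≤ x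
      · rw [if_pos hc]
        exact ih (hi - ((lo + hi) / 2 + 1)) (by omega) _ _ rfl (by omega) hhi
          (fun i hi' => le_trans
            (sorted_getD_mono ts hs i ((lo + hi) / 2) (by omega) (by omega)) hc) hhigh
      · rw [if_neg hc]
        exact ih ((lo + hi) / 2 - lo) (by omega) _ _ rfl (by omega) (by omega) hlow
          (fun i hmi hil => lt_of_lt_of_le (by omega : x < ts.getD ((lo + hi) / 2) 0)
            (sorted_getD_mono ts hs ((lo + hi) / 2) i hmi hil))
    · rw [if_neg h]
      exact ⟨by omega, fun i hi' => hlow i (by omega), fun i h1 h2 => hhigh i (by omega) h2⟩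

-- characterisation of A's forward scan on a list split at k
theorem leftScanA_eq (x : Int) :
    ∀ (ts : List Int) (k : Nat) (acc : Option Int), k ≤ ts.length →
      (∀ i, i < k → ts.getD i 0 ≤ x) →
      (∀ i, k ≤ i → i < ts.length → x < ts.getD i 0) →
      leftScanA ts x acc = if k = 0 then acc else some (ts.getD (k - 1) 0) := by
  intro ts
  induction ts with
  | nil =>
    intro k acc hk _ _
    have hk0 : k = 0 := by simpa using hk
    subst hk0; simp [leftScanA]
  | cons t ts' IH =>
    intro k acc hk hlow hhigh
    cases k with
    | zero =>
      have : x < t := hhigh 0 (by omega) (by simp)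
      simp [leftScanA, not_le.mpr this]
    | succ k' =>
      have ht : t ≤ x := hlow 0 (by omega)
      simp only [leftScanA, ht, if_true]
      rw [IH k' (some t) (by simpa using hk)
        (fun i hi => hlow (i + 1) (by omega))
        (fun i h1 h2 => hhigh (i + 1) (by omega) (by simpa using h2))]
      cases k' with
      | zero => simp
      | succ k'' => simp

-- characterisation of A's backward scan (same shape, predicate x ≤ ·)
theorem rightScanA_eq (x : Int) :
    ∀ (us : List Int) (m : Nat) (acc : Option Int), m ≤ us.length →
      (∀ i, i < m → x ≤ us.getD i 0) →
      (∀ i, m ≤ i → i < us.length → us.getD i 0 < x) →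
      rightScanA us x acc = if m = 0 then acc else some (us.getD (m - 1) 0) := by
  intro us
  induction us with
  | nil =>
    intro m acc hm _ _
    have hm0 : m = 0 := by simpa using hm
    subst hm0; simp [rightScanA]
  | cons t ts' IH =>
    intro m acc hm hlow hhigh
    cases m with
    | zero =>
      have : t < x := hhigh 0 (by omega) (by simp)
      simp [rightScanA, not_le.mpr this]
    | succ m' =>
      have ht : x ≤ t := hlow 0 (by omega)
      simp only [rightScanA, ge_iff_le, ht, if_true]
      rw [IH m' (some t) (by simpa using hm)
        (fun i hi => hlow (i + 1) (by omega))
        (fun i h1 h2 => hhigh (i + 1) (by omega) (by simpa using h2))]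
      cases m' with
      | zero => simp
      | succ m'' => simp

-- takeWhile split facts (specific form used below)
theorem takeWhile_split (p : Int → Bool) :
    ∀ ts : List Int,
      (∀ i, i < (ts.takeWhile p).length → p (ts.getD i 0) = true) ∧
      ((ts.takeWhile p).length < ts.length → p (ts.getD (ts.takeWhile p).length 0) = false) := by
  intro ts
  induction ts with
  | nil => simp
  | cons t ts' IH =>
    by_cases hp : p t
    · refine ⟨?_, ?_⟩
      · intro i hi
        cases i with
        | zero => simpa using hp
        | succ i' =>
          simp only [List.takeWhile_cons, hp, if_true, List.length_cons] at hi
          simpa using IH.1 i' (by simpa using hi)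
      · intro hlen
        simp only [List.takeWhile_cons, hp, if_true, List.length_cons] at hlen ⊢
        simpa using IH.2 (by omega)
    · refine ⟨?_, ?_⟩
      · intro i hi
        simp [hp] at hi
      · intro _
        simp only [List.takeWhile_cons, hp]
        simpa using hp

-- the per-listener step functions agree when the towers are sorted and nonempty
theorem step_eq (ts : List Int) (hne : ts ≠ [])
    (hs : List.Pairwise (fun a b => a ≤ b) ts) (mr x : Int) :
    (let left := leftScanA ts x none
     let right := rightScanA ts.reverse x none
     match left, right with
     | none, r => max mr (r.getD 0 - x)
     | some l, none => max mr (x - l)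
     | some l, some r => max mr (min (x - l) (r - x))) =
    (let lo := bsearchB ts x 0 ts.length
     let d :=
       if lo = 0 then ts.getD 0 0 - x
       else if lo = ts.length then x - ts.getD (ts.length - 1) 0
       else min (x - ts.getD (lo - 1) 0) (ts.getD lo 0 - x)
     if d > mr then d else mr) := by
  have hn : 0 < ts.length := List.length_pos_of_ne_nil hne
  set n := ts.length with hnn
  -- the binary-search split point
  have hkspec : SplitAt ts x (bsearchB ts x 0 n) :=
    bsearchB_spec ts x hs n 0 n (by omega) (by omega) le_rfl
      (fun i hi => absurd hi (Nat.not_lt_zero i)) (fun i hi1 hi2 => absurd hi2 (by omega))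
  set k := bsearchB ts x 0 n with hkk
  obtain ⟨hkn, hk2, hk3⟩ := hkspec
  -- the strict split point k1 (count of towers < x)
  set k1 := (ts.takeWhile (fun t => decide (t < x))).length with hk1def
  have htw := takeWhile_split (fun t => decide (t < x)) ts
  have hk1n : k1 ≤ n := (List.takeWhile_prefix _).length_le
  have tw1 : ∀ i, i < k1 → ts.getD i 0 < x := fun i hi => by
    have := htw.1 i hi; simpa using this
  have tw2 : k1 < n → x ≤ ts.getD k1 0 := fun h => by
    have := htw.2 h; simpa using this
  have hk1k : k1 ≤ k := by
    by_contra hcon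
    have h1 : ts.getD k 0 < x := tw1 k (by omega)
    have h2 : x < ts.getD k 0 := hk3 k (by omega) (by omega)
    omega
  -- reverse indexing
  have hrev : ∀ i : Nat, i < n → ts.reverse.getD i 0 = ts.getD (n - 1 - i) 0 := by
    intro i hi
    rw [List.getD_eq_getElem _ 0 (by simpa using hi), List.getD_eq_getElem _ 0 (by omega),
      List.getElem_reverse]
  -- A's scans, characterised
  have hleft : leftScanA ts x none = if k = 0 then none else some (ts.getD (k - 1) 0) :=
    leftScanA_eq x ts k none hkn hk2 hk3
  have hright : rightScanA ts.reverse x none =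
      if n - k1 = 0 then none else some (ts.getD k1 0) := by
    have := rightScanA_eq x ts.reverse (n - k1) none (by simpa using by omega : n - k1 ≤ ts.reverse.length)
      (fun i hi => by
        rw [hrev i (by omega)]
        have hj : k1 ≤ n - 1 - i := by omega
        have hx : x ≤ ts.getD k1 0 := tw2 (by omega)
        exact le_trans hx (sorted_getD_mono ts hs k1 (n - 1 - i) hj (by omega)))
      (fun i hi1 hi2 => by
        rw [hrev i (by simpa using hi2)]
        exact tw1 (n - 1 - i) (by simp at hi2; omega))
    rw [this]
    rcases Nat.eq_zero_or_pos (n - k1) with h0 | hpos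
    · simp [h0]
    · rw [if_neg (by omega), if_neg (by omega)]
      congr 1
      rw [hrev (n - k1 - 1) (by omega)]
      congr 1
      omega
  have mono := sorted_getD_mono ts hs
  rcases Nat.eq_zero_or_pos k with hk0 | hkpos
  · -- k = 0 : no tower ≤ x, so k1 = 0 and the nearest tower is ts[0]
    have hk10 : k1 = 0 := by omega
    have hleft' : leftScanA ts x none = none := by rw [hleft, if_pos hk0]
    have hright' : rightScanA ts.reverse x none = some (ts.getD k1 0) := by
      rw [hright, if_neg (by omega)]
    simp only [hleft', hright', Option.getD_some]
    rw [if_pos hk0, hk10]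
    split_ifs <;> omega
  · have hleft' : leftScanA ts x none = some (ts.getD (k - 1) 0) := by
      rw [hleft, if_neg (by omega)]
    by_cases hk1top : k1 = n
    · -- every tower < x: nearest tower is the last one
      have hkn' : k = n := by omega
      have hright' : rightScanA ts.reverse x none = none := by
        rw [hright, if_pos (by omega)]
      simp only [hleft', hright']
      rw [if_neg (by omega : ¬ k = 0), if_pos hkn',
        (by omega : k - 1 = n - 1)]
      split_ifs <;> omega
    · have hright' : rightScanA ts.reverse x none = some (ts.getD k1 0) := by
        rw [hright, if_neg (by omega)]
      simp only [hleft', hright']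
      rw [if_neg (by omega : ¬ k = 0)]
      have hc2 : x ≤ ts.getD k1 0 := tw2 (by omega)
      by_cases hkn' : k = n
      · -- x occurs among the towers (ts[k1] = x = ts[n-1]); both sides give 0
        rw [if_pos hkn', (by omega : k - 1 = n - 1)]
        have hc1 : ts.getD k1 0 ≤ x := hk2 k1 (by omega)
        have hb1 : ts.getD k1 0 ≤ ts.getD (n - 1) 0 := mono k1 (n - 1) (by omega) (by omega)
        have hb2 : ts.getD (n - 1) 0 ≤ x := hk2 (n - 1) (by omega)
        split_ifs <;> omega
      · rw [if_neg hkn']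
        rcases Nat.lt_or_ge k1 k with hlt | hge
        · -- x occurs among the towers (ts[k1] = x = ts[k-1]); both sides give 0
          have hc1 : ts.getD k1 0 ≤ x := hk2 k1 (by omega)
          have ha1 : ts.getD k1 0 ≤ ts.getD (k - 1) 0 := mono k1 (k - 1) (by omega) (by omega)
          have ha2 : ts.getD (k - 1) 0 ≤ x := hk2 (k - 1) (by omega)
          have hck : x < ts.getD k 0 := hk3 k (by omega) (by omega)
          split_ifs <;> omega
        · rw [(by omega : k1 = k)]
          split_ifs <;> omega

-- ===== VERDICT (by name: the statement is the Claim_ definition above) =====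
theorem min_broadcast_range_spec : Claim_equal_min_broadcast_range := by
  intro listeners towers _ hpre
  unfold Spec_min_broadcast_range min_broadcast_range min_broadcast_range_alt
  simp only []
  rcases hpre with hT | hL
  · -- towers nonempty: the per-listener bodies agree pointwise
    have hts : PySem.List.sorted towers (fun t => t) ≠ [] := by
      simpa [PySem.List.sorted_eq_nil_iff] using hT
    exact PySem.List.foldl_congr_mem _ _ _ _
      (fun mr x _ => step_eq (PySem.List.sorted towers (fun t => t)) hts
        (PySem.List.sorted_pairwise towers (fun t => t)) mr x)
  · subst hL
    have : PySem.List.sorted ([] : List Int) (fun t => t) = [] :=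
      (PySem.List.sorted_eq_nil_iff _ _ _).mpr rfl
    rw [this]
    rfl
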